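-- pv_equiv track=rewrite | github.com/markertsean/dominion_ai | brains/brain_functions.py | combine_deck_count
-- ===== SOURCE A (Python) =====
-- def combine_deck_count( deck_list ):
--     output_dict = {}
--     for this_deck in deck_list:
--         for key, val in this_deck.items():
--             if ( key in output_dict ):
--                 output_dict[key] += val
--             else:
--                 output_dict[key] = val
--     return output_dict
-- ===== SOURCE B (Python) =====
-- def combine_deck_count(deck_list):
--     # two-phase: gather keys in first-occurrence order, then sum per key
--     keys = list(dict.fromkeys(k for d in deck_list for k in d))
--     return {key: sum(d[key] for d in deck_list if key in d) for key in keys}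
-- ===== Notes on version B (the rewrite author's own statement) =====
-- stated objective: alternative
-- what changed: Replaces A's single forward pass that accumulates into a dict with a two-phase computation: first collect all keys in first-occurrence order via dict.fromkeys, then build the result by one per-key sum of d[key] over the decks containing the key.
import Mathlib
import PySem

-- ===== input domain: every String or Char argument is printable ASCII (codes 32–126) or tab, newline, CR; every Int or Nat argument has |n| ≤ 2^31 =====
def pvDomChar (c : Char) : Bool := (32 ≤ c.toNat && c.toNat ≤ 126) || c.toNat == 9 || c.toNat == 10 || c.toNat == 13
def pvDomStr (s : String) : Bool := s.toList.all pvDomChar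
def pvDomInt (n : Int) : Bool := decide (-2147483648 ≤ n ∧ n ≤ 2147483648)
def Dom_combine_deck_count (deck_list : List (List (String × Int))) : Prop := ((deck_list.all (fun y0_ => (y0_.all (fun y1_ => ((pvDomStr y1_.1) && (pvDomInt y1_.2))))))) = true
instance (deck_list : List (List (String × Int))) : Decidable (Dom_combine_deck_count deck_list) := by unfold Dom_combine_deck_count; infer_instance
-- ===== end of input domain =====

-- B replaces A's single accumulate-into-a-dict pass by a two-phase computation
-- (first-occurrence key list, then one per-key sum over the decks): an alternative
-- decomposition, not claimed faster.

-- ===== PORT A =====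
-- loop body of A: if key in output_dict: output_dict[key] += val else: output_dict[key] = val
def pvStepA (od : PySem.Dict String Int) (kv : String × Int) : PySem.Dict String Int :=
  if od.contains kv.1 then od.insert kv.1 (od.getD kv.1 0 + kv.2)
  else od.insert kv.1 kv.2

def combine_deck_count (deck_list : List (List (String × Int))) : List (String × Int) :=
  (deck_list.foldl (fun od this_deck => this_deck.foldl pvStepA od) PySem.Dict.empty).items

-- ===== PORT B =====
-- sum(d[key] for d in deck_list if key in d): 'key in d' is a first-match scan of the
-- association list; 'd[key]' is the first match — exact for decks with distinct keys
-- (Pre_), where it cannot raise KeyError thanks to the guard (the .getD 0 is unreachable).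
def pvKeySum (deck_list : List (List (String × Int))) (key : String) : Int :=
  (((deck_list.filter (fun d => d.any (fun kv => kv.1 == key))).map
    (fun d => ((d.find? (fun kv => kv.1 == key)).map Prod.snd).getD 0)).sum)

def combine_deck_count_alt (deck_list : List (List (String × Int))) : List (String × Int) :=
  (PySem.List.dedup (deck_list.flatMap (fun d => d.map Prod.fst))).map
    (fun key => (key, pvKeySum deck_list key))

-- ===== PRECONDITION & SPEC =====
-- Each deck models a Python dict, which cannot contain duplicate keys: Pre_ only rules
-- out association lists with a repeated key inside one deck, which correspond to no
-- Python input, so no input the Python A accepts is excluded.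
def Pre_combine_deck_count (deck_list : List (List (String × Int))) : Prop :=
  ∀ d ∈ deck_list, (d.map Prod.fst).Nodup
instance (deck_list : List (List (String × Int))) : Decidable (Pre_combine_deck_count deck_list) := by unfold Pre_combine_deck_count; infer_instance
def pvWitness_combine_deck_count : (List (List (String × Int))) :=
  [[("a", 1)], [("a", 2), ("b", 3)], []]

def Spec_combine_deck_count (deck_list : List (List (String × Int))) (out : List (String × Int)) : Prop := out = combine_deck_count_alt deck_list
instance (deck_list : List (List (String × Int))) (out : List (String × Int)) : Decidable (Spec_combine_deck_count deck_list out) := by unfold Spec_combine_deck_count; infer_instance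

-- ===== CLAIM (what is proved, stated in full; the proofs are below) =====
def Claim_equal_combine_deck_count : Prop := ∀ (deck_list : List (List (String × Int))), Dom_combine_deck_count deck_list → Pre_combine_deck_count deck_list → Spec_combine_deck_count deck_list (combine_deck_count deck_list)

-- ===== LEMMAS AND PROOFS =====

-- the per-key sum over a flat pair list
def pvSum (ps : List (String × Int)) (k : String) : Int :=
  ((ps.filter (fun kv => kv.1 == k)).map Prod.snd).sum

lemma pvSum_append_singleton (qs : List (String × Int)) (p : String × Int) (k : String) :
    pvSum (qs ++ [p]) k = pvSum qs k + (if p.1 = k then p.2 else 0) := by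
  simp [pvSum, List.filter_append]
  by_cases h : p.1 = k <;> simp [h]

-- A's fold over any flat pair list produces exactly the per-key-sum table
lemma items_foldl_stepA (ps : List (String × Int)) :
    (ps.foldl pvStepA PySem.Dict.empty).items =
      (PySem.Set.ofList (ps.map Prod.fst)).map (fun k => (k, pvSum ps k)) := by
  induction ps using List.reverseRecOn with
  | nil => rfl
  | append_singleton qs p ih =>
    have hkeys : (qs.foldl pvStepA PySem.Dict.empty).keys
        = PySem.Set.ofList (qs.map Prod.fst) := by
      simp only [PySem.Dict.keys, ih, List.map_map]
      exact (List.map_congr_left fun a _ => rfl).trans (List.map_id _)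
    rw [List.foldl_append, List.foldl_cons, List.foldl_nil]
    by_cases hp : p.1 ∈ PySem.Set.ofList (qs.map Prod.fst)
    · -- key already present: in-place update
      have hc : (qs.foldl pvStepA PySem.Dict.empty).contains p.1 = true := by
        rw [PySem.Dict.contains_eq_decide_mem_keys, hkeys]; simp [hp]
      have hmem : (p.1, pvSum qs p.1) ∈ (qs.foldl pvStepA PySem.Dict.empty).items := by
        rw [ih]; exact List.mem_map.mpr ⟨p.1, hp, rfl⟩
      have hnd : (qs.foldl pvStepA PySem.Dict.empty).keys.Nodup := by
        rw [hkeys]; exact PySem.Set.nodup_ofList _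
      have hgd : (qs.foldl pvStepA PySem.Dict.empty).getD p.1 0 = pvSum qs p.1 :=
        PySem.Dict.getD_of_mem_items _ hmem hnd 0
      rw [pvStepA, if_pos hc, PySem.Dict.items_insert_of_contains _ _ hc, hgd, ih]
      simp only [List.map_append, List.map_cons, List.map_nil]
      rw [PySem.Set.ofList_append_singleton, PySem.Set.add_of_mem hp, List.map_map]
      apply List.map_congr_left
      intro k hk
      by_cases hkp : k = p.1
      · subst hkp; simp [pvSum_append_singleton]
      · simp [Function.comp, hkp, Ne.symm hkp, pvSum_append_singleton]
    · -- fresh key: appended at the end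
      have hc : (qs.foldl pvStepA PySem.Dict.empty).contains p.1 = false := by
        rw [PySem.Dict.contains_eq_decide_mem_keys, hkeys]; simp [hp]
      have hq0 : pvSum qs p.1 = 0 := by
        have : qs.filter (fun kv => kv.1 == p.1) = [] := by
          rw [List.filter_eq_nil_iff]
          intro kv hkv hbe
          exact hp ((PySem.Set.mem_ofList _ _).mpr (List.mem_map.mpr
            ⟨kv, hkv, eq_of_beq hbe⟩))
        simp [pvSum, this]
      rw [pvStepA, if_neg (by simp [hc]), PySem.Dict.items_insert_of_not_contains _ _ hc, ih]
      simp only [List.map_append, List.map_cons, List.map_nil]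
      rw [PySem.Set.ofList_append_singleton, PySem.Set.add_of_not_mem hp, List.map_append]
      congr 1
      · apply List.map_congr_left
        intro k hk
        have : p.1 ≠ k := fun h => hp (h ▸ hk)
        simp [pvSum_append_singleton, this]
      · simp [pvSum_append_singleton, hq0]

-- on a deck with distinct keys, B's guarded first-match lookup is the deck's filter-sum
lemma deck_lookup_eq_pvSum (d : List (String × Int)) (k : String)
    (hnd : (d.map Prod.fst).Nodup) :
    (if d.any (fun kv => kv.1 == k) then
      ((d.find? (fun kv => kv.1 == k)).map Prod.snd).getD 0 else 0) = pvSum d k := by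
  induction d with
  | nil => simp [pvSum]
  | cons kv rest ih =>
    simp only [List.map_cons, List.nodup_cons] at hnd
    by_cases h : kv.1 = k
    · have hrest : rest.filter (fun kv' => kv'.1 == k) = [] := by
        rw [List.filter_eq_nil_iff]
        intro q hq hbe
        exact hnd.1 (List.mem_map.mpr ⟨q, hq, (eq_of_beq hbe).trans h.symm⟩)
      simp [pvSum, List.any_cons, List.find?, h, hrest]
    · have hb : (kv.1 == k) = false := by simp [h]
      simp only [pvSum, List.filter_cons, hb, List.any_cons, List.find?, hb,
        Bool.false_or, cond_false]
      exact ih hnd.2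

-- the flat per-key sum splits as a sum of per-deck sums
lemma pvSum_flatMap (deck_list : List (List (String × Int))) (k : String) :
    pvSum (deck_list.flatMap (fun d => d)) k
      = (deck_list.map (fun d => pvSum d k)).sum := by
  induction deck_list with
  | nil => rfl
  | cons d rest ih => simp [pvSum, List.filter_append, List.map_append] at ih ⊢; omega

-- a sum over a filtered list is the sum of the guarded terms
lemma sum_filter_eq_sum_ite (deck_list : List (List (String × Int))) (k : String) :
    pvKeySum deck_list k
      = (deck_list.map (fun d => if d.any (fun kv => kv.1 == k) then
          ((d.find? (fun kv => kv.1 == k)).map Prod.snd).getD 0 else 0)).sum := by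
  induction deck_list with
  | nil => rfl
  | cons d rest ih =>
    by_cases h : d.any (fun kv => kv.1 == k) <;>
      simp [pvKeySum, List.filter_cons, h] at ih ⊢ <;> omega

-- ===== VERDICT (by name: the statement is the Claim_ definition above) =====
theorem combine_deck_count_spec : Claim_equal_combine_deck_count := by
  intro deck_list hdom hpre
  clear hdom
  show combine_deck_count deck_list = combine_deck_count_alt deck_list
  rw [combine_deck_count, combine_deck_count_alt]
  have hflat : deck_list.foldl (fun od this_deck => this_deck.foldl pvStepA od)
      PySem.Dict.empty = (deck_list.flatMap (fun d => d)).foldl pvStepA PySem.Dict.empty := by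
    clear hpre
    induction deck_list using List.reverseRecOn with
    | nil => rfl
    | append_singleton ds d ih =>
      rw [List.foldl_append, ih, List.flatMap_append, List.foldl_append]
      simp
  rw [hflat, items_foldl_stepA]
  have hkeys : PySem.List.dedup (deck_list.flatMap (fun d => d.map Prod.fst))
      = PySem.Set.ofList ((deck_list.flatMap (fun d => d)).map Prod.fst) := by
    simp [PySem.List.dedup_eq_ofList, List.flatMap_def]
  rw [hkeys]
  apply List.map_congr_left
  intro k _
  have : pvKeySum deck_list k = pvSum (deck_list.flatMap (fun d => d)) k := by
    rw [sum_filter_eq_sum_ite, pvSum_flatMap]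
    exact congrArg List.sum (List.map_congr_left fun d hd =>
      deck_lookup_eq_pvSum d k (hpre d hd))
  rw [this]
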